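-- pv_equiv track=rewrite | github.com/topatlant/AdventOfCode-python | y2017/day03.py | walk_in_spiral
-- ===== SOURCE A (Python) =====
-- def walk_in_spiral(n: int) -> str:
--     """get a string of directions that takes you to the n-th position
--     (starting from the origin == 1)"""
--     k = 1
--     res = ""
--     while len(res) < n - 1:
--         res += "r" * k  # right
--         res += "u" * k  # up
--         k += 1
--         res += "l" * k  # left
--         res += "d" * k  # down
--         k += 1
--     return res[: n - 1]
-- ===== SOURCE B (Python) =====
-- def walk_in_spiral(n: int) -> str:
--     """get a string of directions that takes you to the n-th position
--     (starting from the origin == 1)"""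
--     t = n - 1
--     if t <= 0:
--         return ""
--     # The spiral is a concatenation of "pairs" m = 0, 1, 2, ...: two runs of
--     # length m+1 each (r/u for even m, l/d for odd m); the first a complete
--     # pairs occupy a*(a+1) characters.  Binary-search the largest a with
--     # a*(a+1) <= t, emit exactly those pairs, then the partial pair a.
--     lo, hi = 0, t
--     while lo < hi:
--         mid = (lo + hi + 1) // 2
--         if mid * (mid + 1) <= t:
--             lo = mid
--         else:
--             hi = mid - 1
--     a = lo
--     res = ""
--     for m in range(a):
--         res += "rl"[m % 2] * (m + 1) + "ud"[m % 2] * (m + 1)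
--     rem = t - a * (a + 1)
--     res += ("rl"[a % 2] * (a + 1) + "ud"[a % 2] * (a + 1))[:rem]
--     return res
-- ===== Notes on version B (the rewrite author's own statement) =====
-- stated objective: alternative
-- what changed: B computes the output's shape in closed form first - binary-searching the largest a with a*(a+1) <= n-1, the cumulative length of a complete direction pairs - then emits exactly those pairs by an index formula plus one arithmetically sized partial pair, instead of A's stateful grow-until-long-enough while-loop with a final global truncation; it appends one pair-sized chunk per iteration with no per-iteration length test and no final slice copy.
import Mathlib
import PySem

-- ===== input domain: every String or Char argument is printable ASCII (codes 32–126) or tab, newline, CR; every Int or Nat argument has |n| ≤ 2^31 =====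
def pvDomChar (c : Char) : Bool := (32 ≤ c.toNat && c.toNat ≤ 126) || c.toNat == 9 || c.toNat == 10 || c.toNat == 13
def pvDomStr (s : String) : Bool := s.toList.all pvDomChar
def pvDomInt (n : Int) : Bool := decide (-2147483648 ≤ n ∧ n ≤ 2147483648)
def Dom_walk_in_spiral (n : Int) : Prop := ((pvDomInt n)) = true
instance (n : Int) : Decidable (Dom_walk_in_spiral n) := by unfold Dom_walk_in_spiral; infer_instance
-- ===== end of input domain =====

-- B determines the output's shape in closed form (binary search for the number of complete
-- direction pairs) and emits exactly that, instead of A's grow-and-truncate loop; objective: alternative.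

-- ===== PORT A =====
-- A's while-loop: state (k, res); per iteration res += "r"*k + "u"*k, k += 1,
-- res += "l"*k + "d"*k, k += 1.  k is always a positive integer, modelled as Nat.
def walk_in_spiral_loop (n : Int) (k : Nat) (res : List Char) : List Char :=
  if (res.length : Int) < n - 1 then
    walk_in_spiral_loop n (k + 2)
      (res ++ List.replicate k 'r' ++ List.replicate k 'u'
           ++ List.replicate (k + 1) 'l' ++ List.replicate (k + 1) 'd')
  else res
termination_by (n - 1 - res.length).toNat
decreasing_by simp; omega

-- res[: n - 1]: when n - 1 < 0 the loop never ran, so res = "" and the slice is ""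
-- = take 0; for n - 1 ≥ 0 the slice is exactly take (n-1).  Hence `take (n-1).toNat`.
def walk_in_spiral (n : Int) : String :=
  String.mk ((walk_in_spiral_loop n 1 []).take (n - 1).toNat)

-- ===== PORT B =====
-- B's binary search: lo, hi = 0, t; while lo < hi: …  (t ≥ 1 at the call site, so Nat)
def walk_bsearch (p lo hi : Nat) : Nat :=
  if lo < hi then
    if ((lo + hi + 1) / 2) * ((lo + hi + 1) / 2 + 1) ≤ p then
      walk_bsearch p ((lo + hi + 1) / 2) hi
    else
      walk_bsearch p lo ((lo + hi + 1) / 2 - 1)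
  else lo
termination_by hi - lo
decreasing_by all_goals omega

-- "rl"[m % 2] * (m + 1) + "ud"[m % 2] * (m + 1)
def walk_pairStr (m : Nat) : List Char :=
  List.replicate (m + 1) (if m % 2 = 0 then 'r' else 'l')
    ++ List.replicate (m + 1) (if m % 2 = 0 then 'u' else 'd')

-- B: t = n-1; early "" for t <= 0; a from the binary search; the for-loop
-- res += pair(m) over range(a) as a foldl; then the partial pair a sliced to
-- rem = t - a*(a+1) appended.
def walk_in_spiral_alt (n : Int) : String :=
  if n - 1 ≤ 0 then String.mk []
  else
    String.mk (((List.range (walk_bsearch (n - 1).toNat 0 (n - 1).toNat)).foldl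
        (fun res m => res ++ walk_pairStr m) [])
      ++ (walk_pairStr (walk_bsearch (n - 1).toNat 0 (n - 1).toNat)).take
          ((n - 1).toNat - (walk_bsearch (n - 1).toNat 0 (n - 1).toNat)
            * (walk_bsearch (n - 1).toNat 0 (n - 1).toNat + 1)))

-- ===== PRECONDITION & SPEC =====
def Spec_walk_in_spiral (n : Int) (out : String) : Prop := out = walk_in_spiral_alt n
instance (n : Int) (out : String) : Decidable (Spec_walk_in_spiral n out) := by unfold Spec_walk_in_spiral; infer_instance

-- ===== CLAIM (what is proved, stated in full; the proofs are below) =====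
def Claim_equal_walk_in_spiral : Prop := ∀ (n : Int), Dom_walk_in_spiral n → Spec_walk_in_spiral n (walk_in_spiral n)

-- ===== LEMMAS AND PROOFS =====

-- tail of A's loop output past the current res, as a function of the current length
def aT (target len : Int) (k : Nat) : List Char :=
  if len < target then
    (List.replicate k 'r' ++ List.replicate k 'u'
      ++ List.replicate (k + 1) 'l' ++ List.replicate (k + 1) 'd')
      ++ aT target (len + ((2 * k + 2 * (k + 1) : Nat) : Int)) (k + 2)
  else []
termination_by (target - len).toNat
decreasing_by omega

theorem aLoop_eq_aT (n : Int) (k : Nat) (res : List Char) :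
    walk_in_spiral_loop n k res = res ++ aT (n - 1) res.length k := by
  rw [walk_in_spiral_loop, aT]
  split
  · rw [aLoop_eq_aT]
    have harg : (((res ++ List.replicate k 'r' ++ List.replicate k 'u'
        ++ List.replicate (k + 1) 'l' ++ List.replicate (k + 1) 'd').length : Int))
        = (res.length : Int) + ((2 * k + 2 * (k + 1) : Nat) : Int) := by
      simp; ring
    rw [harg]
    simp
  · simp
termination_by (n - 1 - res.length).toNat
decreasing_by simp; omega

-- the binary search returns the unique m with m*(m+1) ≤ p < (m+1)*(m+2)
theorem walk_bsearch_eq (p m lo hi : Nat) (hm1 : m * (m + 1) ≤ p)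
    (hm2 : p < (m + 1) * (m + 2)) (h1 : lo ≤ m) (h2 : m ≤ hi) :
    walk_bsearch p lo hi = m := by
  rw [walk_bsearch]
  split
  · rename_i h
    split
    · rename_i hc
      refine walk_bsearch_eq p m _ _ hm1 hm2 ?_ h2
      by_contra h'
      push_neg at h'
      have : (m + 1) * (m + 2) ≤ ((lo + hi + 1) / 2) * ((lo + hi + 1) / 2 + 1) :=
        Nat.mul_le_mul (by omega) (by omega)
      omega
    · rename_i hc
      push_neg at hc
      refine walk_bsearch_eq p m _ _ hm1 hm2 h1 ?_
      by_contra h'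
      push_neg at h'
      have : ((lo + hi + 1) / 2) * ((lo + hi + 1) / 2 + 1) ≤ m * (m + 1) :=
        Nat.mul_le_mul (by omega) (by omega)
      omega
  · omega
termination_by hi - lo
decreasing_by all_goals omega

-- every p has such an m
theorem walk_pair_exists (p : Nat) : ∃ m, m * (m + 1) ≤ p ∧ p < (m + 1) * (m + 2) := by
  induction p with
  | zero => exact ⟨0, by omega, by omega⟩
  | succ p ih =>
    obtain ⟨m, h1, h2⟩ := ih
    have e1 : (m + 1) * (m + 1 + 1) = (m + 1) * (m + 2) := by ring
    have e2 : (m + 1 + 1) * (m + 1 + 2) = (m + 2) * (m + 3) := by ring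
    have hlt : (m + 1) * (m + 2) < (m + 2) * (m + 3) := by nlinarith
    by_cases h : p + 1 < (m + 1) * (m + 2)
    · exact ⟨m, by omega, by omega⟩
    · exact ⟨m + 1, by omega, by omega⟩

theorem walk_mOf_eq (p m : Nat) (hm1 : m * (m + 1) ≤ p) (hm2 : p < (m + 1) * (m + 2)) :
    walk_bsearch p 0 p = m := by
  refine walk_bsearch_eq p m 0 p hm1 hm2 (Nat.zero_le m) ?_
  have := Nat.le_mul_of_pos_right m (show 0 < m + 1 by omega)
  omega

-- per-index direction of the spiral (specification device for both programs)
def walk_dir_at (p : Nat) : Char :=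
  let m := walk_bsearch p 0 p
  if p < m * (m + 1) + m + 1 then (if m % 2 = 0 then 'r' else 'l')
  else (if m % 2 = 0 then 'u' else 'd')

-- walk_dir_at is constant on the first run of pair m …
theorem walk_dir_first (m q : Nat) (hq : q ≤ m) :
    walk_dir_at (m * (m + 1) + q) = (if m % 2 = 0 then 'r' else 'l') := by
  have he : (m + 1) * (m + 2) = m * (m + 1) + 2 * m + 2 := by ring
  have hm := walk_mOf_eq (m * (m + 1) + q) m (by omega) (by omega)
  unfold walk_dir_at
  rw [hm, if_pos (by omega)]

-- … and on the second run of pair m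
theorem walk_dir_second (m q : Nat) (hq : q ≤ m) :
    walk_dir_at (m * (m + 1) + (m + 1) + q) = (if m % 2 = 0 then 'u' else 'd') := by
  have he : (m + 1) * (m + 2) = m * (m + 1) + 2 * m + 2 := by ring
  have hm := walk_mOf_eq (m * (m + 1) + (m + 1) + q) m (by omega) (by omega)
  unfold walk_dir_at
  rw [hm, if_neg (by omega)]

-- a map over a range where f is constant is a replicate
theorem walk_map_rep (c : Char) (L : Nat) (f : Nat → Char) (hc : ∀ q, q < L → f q = c) :
    (List.range L).map f = List.replicate L c := by
  rw [List.eq_replicate_iff]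
  refine ⟨by simp, ?_⟩
  intro b hb
  rcases List.mem_map.mp hb with ⟨q, hq, rfl⟩
  exact hc q (List.mem_range.mp hq)

-- peel one constant run off both sides
theorem walk_peel (c : Char) (L T : Nat) (rest : List Char) (f : Nat → Char)
    (hc : ∀ q, q < L → f q = c)
    (htail : (List.range (T - L)).map (fun q => f (L + q)) = rest.take (T - L)) :
    (List.range T).map f = (List.replicate L c ++ rest).take T := by
  by_cases h : T ≤ L
  · have h0 : T - L = 0 := by omega
    rw [List.take_append]
    simp only [List.length_replicate, h0, List.take_zero, List.append_nil, List.take_replicate]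
    have hmin : min T L = T := by omega
    rw [hmin]
    exact walk_map_rep c T f (fun q hq => hc q (by omega))
  · have hT : T = L + (T - L) := by omega
    rw [hT, List.range_add, List.map_append, List.map_map]
    rw [List.take_append, List.length_replicate]
    have h2 : L + (T - L) - L = T - L := by omega
    have h3 : (List.replicate L c).take (L + (T - L)) = List.replicate L c := by
      rw [List.take_replicate]; congr 1; omega
    simp only [Function.comp_def]
    rw [h2, h3, walk_map_rep c L f hc, htail]

-- main characterisation of A: after j rounds (offset P = 2j(2j+1), k = 2j+1), the rest of
-- A's stream, truncated, is the per-index map of walk_dir_at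
theorem walk_main (j : Nat) (target : Int) :
    (List.range (target - (2 * j * (2 * j + 1) : Nat)).toNat).map
        (fun q => walk_dir_at (2 * j * (2 * j + 1) + q))
      = (aT target ((2 * j * (2 * j + 1) : Nat) : Int) (2 * j + 1)).take
          (target - (2 * j * (2 * j + 1) : Nat)).toNat := by
  rw [aT]
  by_cases h : ((2 * j * (2 * j + 1) : Nat) : Int) < target
  · simp only [if_pos h]
    rw [List.append_assoc, List.append_assoc, List.append_assoc]
    apply walk_peel
    · intro q hq
      have e : 2 * j * (2 * j + 1) + q = (2 * j) * (2 * j + 1) + q := by ring_nf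
      rw [e, walk_dir_first (2 * j) q (by omega)]
      simp [Nat.mul_mod_right]
    apply walk_peel
    · intro q hq
      have e : 2 * j * (2 * j + 1) + (2 * j + 1 + q)
          = (2 * j) * (2 * j + 1) + (2 * j + 1) + q := by ring_nf
      rw [e, walk_dir_second (2 * j) q (by omega)]
      simp [Nat.mul_mod_right]
    apply walk_peel
    · intro q hq
      have e : 2 * j * (2 * j + 1) + (2 * j + 1 + (2 * j + 1 + q))
          = (2 * j + 1) * (2 * j + 2) + q := by ring_nf
      rw [e, walk_dir_first (2 * j + 1) q (by omega)]
      have : (2 * j + 1) % 2 = 1 := by omega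
      simp [this]
    apply walk_peel
    · intro q hq
      have e : 2 * j * (2 * j + 1) + (2 * j + 1 + (2 * j + 1 + (2 * j + 2 + q)))
          = (2 * j + 1) * (2 * j + 2) + (2 * j + 2) + q := by ring_nf
      rw [e, walk_dir_second (2 * j + 1) q (by omega)]
      have : (2 * j + 1) % 2 = 1 := by omega
      simp [this]
    · -- recurse: the tail is round j+1
      have hP : 2 * (j + 1) * (2 * (j + 1) + 1) = 2 * j * (2 * j + 1) + (8 * j + 6) := by ring
      have hk : 2 * j + 1 + 2 = 2 * (j + 1) + 1 := by omega
      have harg : ((2 * j * (2 * j + 1) : Nat) : Int)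
            + ((2 * (2 * j + 1) + 2 * (2 * j + 1 + 1) : Nat) : Int)
          = ((2 * (j + 1) * (2 * (j + 1) + 1) : Nat) : Int) := by
        push_cast [hP]; ring
      have hT : (target - (2 * j * (2 * j + 1) : Nat)).toNat - (2 * j + 1) - (2 * j + 1)
            - (2 * j + 2) - (2 * j + 2)
          = (target - (2 * (j + 1) * (2 * (j + 1) + 1) : Nat)).toNat := by
        rw [hP]; push_cast; omega
      have hf : ∀ q : Nat, 2 * j * (2 * j + 1)
            + (2 * j + 1 + (2 * j + 1 + (2 * j + 2 + (2 * j + 2 + q))))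
          = 2 * (j + 1) * (2 * (j + 1) + 1) + q := by intro q; rw [hP]; omega
      have := walk_main (j + 1) target
      rw [hk, harg, hT]
      simp only [hf]
      exact this
  · simp only [if_neg h]
    have h0 : (target - (2 * j * (2 * j + 1) : Nat)).toNat = 0 := by omega
    rw [h0]
    simp
termination_by (target - (2 * j * (2 * j + 1) : Nat)).toNat
decreasing_by
  have hP : 2 * (j + 1) * (2 * (j + 1) + 1) = 2 * j * (2 * j + 1) + (8 * j + 6) := by ring
  rw [hP]
  push_cast
  push_cast at h
  omega

-- B's accumulation loop is the flattened list of pairs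
theorem walk_foldl_pairs (f : Nat → List Char) (l : List Nat) (init : List Char) :
    l.foldl (fun res m => res ++ f m) init = init ++ (l.map f).flatten := by
  induction l generalizing init with
  | nil => simp
  | cons x xs ih => simp [List.foldl_cons, ih]

-- the first a*(a+1) characters of the per-index map are the a complete pairs
theorem walk_prefix_pairs (a : Nat) :
    (List.range (a * (a + 1))).map walk_dir_at = ((List.range a).map walk_pairStr).flatten := by
  induction a with
  | zero => simp
  | succ a ih =>
    have hsplit : (a + 1) * (a + 2) = a * (a + 1) + (a + 1 + (a + 1)) := by ring
    rw [hsplit, List.range_add, List.map_append, List.map_map, ih,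
        List.range_succ, List.map_append, List.flatten_append]
    congr 1
    simp only [List.map_cons, List.map_nil, List.flatten_cons, List.flatten_nil,
      List.append_nil, Function.comp_def]
    rw [List.range_add, List.map_append, List.map_map]
    unfold walk_pairStr
    congr 1
    · exact walk_map_rep _ _ _ (fun q hq => walk_dir_first a q (by omega))
    · refine walk_map_rep _ ((a : Nat) + 1) _ (fun q hq => ?_)
      simp only [Function.comp_def]
      have e : a * (a + 1) + (a + 1 + q) = a * (a + 1) + (a + 1) + q := by omega
      rw [e]
      exact walk_dir_second a q (by omega)

-- the remaining r characters are a prefix of pair a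
theorem walk_tail_part (a r : Nat) (hr : r ≤ 2 * a + 1) :
    (List.range r).map (fun q => walk_dir_at (a * (a + 1) + q)) = (walk_pairStr a).take r := by
  unfold walk_pairStr
  apply walk_peel
  · intro q hq
    exact walk_dir_first a q (by omega)
  · rw [List.take_replicate]
    have hmin : min (r - (a + 1)) (a + 1) = r - (a + 1) := by omega
    rw [hmin]
    refine walk_map_rep _ _ _ (fun q hq => ?_)
    have e : a * (a + 1) + (a + 1 + q) = a * (a + 1) + (a + 1) + q := by omega
    rw [e]
    exact walk_dir_second a q (by omega)

-- ===== VERDICT (by name: the statement is the Claim_ definition above) =====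
theorem walk_in_spiral_spec : Claim_equal_walk_in_spiral := by
  intro n _
  unfold Spec_walk_in_spiral walk_in_spiral walk_in_spiral_alt
  have hA : (walk_in_spiral_loop n 1 []).take (n - 1).toNat
      = (List.range (n - 1).toNat).map walk_dir_at := by
    rw [aLoop_eq_aT]
    have := walk_main 0 (n - 1)
    simp only [Nat.mul_zero, Nat.zero_mul, Nat.cast_zero, Int.sub_zero, Nat.zero_add] at this
    simp only [List.nil_append, List.length_nil, Nat.cast_zero]
    rw [← this]
  rw [hA]
  by_cases h : n - 1 ≤ 0
  · rw [if_pos h]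
    have h0 : (n - 1).toNat = 0 := by omega
    rw [h0]
    rfl
  · rw [if_neg h]
    rw [walk_foldl_pairs]
    simp only [List.nil_append]
    obtain ⟨m, hm1, hm2⟩ := walk_pair_exists (n - 1).toNat
    rw [walk_mOf_eq (n - 1).toNat m hm1 hm2]
    set t := (n - 1).toNat with ht
    set r := t - m * (m + 1) with hrdef
    have hsplit : t = m * (m + 1) + r := by omega
    rw [hsplit, List.range_add, List.map_append, List.map_map, walk_prefix_pairs]
    have hb : (List.range r).map (fun q => walk_dir_at (m * (m + 1) + q))
        = (walk_pairStr m).take r := by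
      refine walk_tail_part m r ?_
      have : (m + 1) * (m + 2) = m * (m + 1) + 2 * m + 2 := by ring
      omega
    simp only [Function.comp_def]
    rw [hb]
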